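-- pv_equiv track=rewrite | github.com/AlexShkarin/pyLabLib | pylablib/core/utils/crc.py | calc_table
-- ===== SOURCE A (Python) =====
-- def binv(a, l):
--     """Reverse bit order of `a` treating it as an `l`-bit number"""
--     ai=0
--     for _ in range(l):
--         ai=(ai<<1)|(a&0x01)
--         a>>=1
--     return ai
--
-- _bi=[binv(i,8) for i in range(0x100)]
--
-- def _get_polylen(poly):
--     if poly<0x100:
--         return 1
--     if poly<0x10000:
--         return 2
--     if poly<0x100000000:
--         return 4
--     raise ValueError("polynomial {} is too long")
--
-- def calc_table(poly, ref=False):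
--     """
--     Calculate CRC byte table for the given polynomial and reflection parameter.
--
--     `ref` specifies whether both input and output bit sequences are reflected.
--     """
--     table=[]
--     l=_get_polylen(poly)
--     msb=1<<(l*8-1)
--     mask=(1<<l*8)-1
--     for i in range(0x100):
--         if ref:
--             i=_bi[i]
--         for _ in range(l*8):
--             d=i&msb
--             i=(i<<1)&mask
--             if d:
--                 i^=poly
--         if ref:
--             i=binv(i,l*8)
--         table.append(i)
--     return table
-- ===== SOURCE B (Python) =====
-- def binv(a, l):
--     """Reverse bit order of `a` treating it as an `l`-bit number"""
--     ai = 0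
--     for _ in range(l):
--         ai = (ai << 1) | (a & 0x01)
--         a >>= 1
--     return ai
--
--
-- def _get_polylen(poly):
--     if poly < 0x100:
--         return 1
--     if poly < 0x10000:
--         return 2
--     if poly < 0x100000000:
--         return 4
--     raise ValueError("polynomial {} is too long")
--
--
-- def calc_table(poly, ref=False):
--     """
--     Calculate CRC byte table for the given polynomial and reflection parameter.
--
--     Exploits that index -> table entry is GF(2)-linear (bitwise XOR): only the
--     8 single-bit indices 1<<k are pushed through the bit-division pipeline;
--     the other 248 entries are XOR-combinations of those 8 basis values.
--     """
--     l = _get_polylen(poly)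
--     n = l * 8
--     msb = 1 << (n - 1)
--     mask = (1 << n) - 1
--
--     def entry(i):
--         if ref:
--             i = binv(i, 8)
--         for _ in range(n):
--             d = i & msb
--             i = (i << 1) & mask
--             if d:
--                 i ^= poly
--         if ref:
--             i = binv(i, n)
--         return i
--
--     basis = [entry(1 << k) for k in range(8)]
--     table = []
--     for i in range(0x100):
--         v = 0
--         x = i
--         for b in basis:
--             if x & 1:
--                 v ^= b
--             x >>= 1
--         table.append(v)
--     return table
-- ===== Notes on version B (the rewrite author's own statement) =====
-- stated objective: faster
-- what changed: Instead of running the bit-by-bit polynomial-division loop for all 256 table indices, B runs it only for the 8 single-bit indices 1<<k (through the same reflect/divide/reflect pipeline) and builds every other entry as the XOR of the basis values of its set bits, which is valid because the index-to-entry map is GF(2)-linear.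
import Mathlib
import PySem

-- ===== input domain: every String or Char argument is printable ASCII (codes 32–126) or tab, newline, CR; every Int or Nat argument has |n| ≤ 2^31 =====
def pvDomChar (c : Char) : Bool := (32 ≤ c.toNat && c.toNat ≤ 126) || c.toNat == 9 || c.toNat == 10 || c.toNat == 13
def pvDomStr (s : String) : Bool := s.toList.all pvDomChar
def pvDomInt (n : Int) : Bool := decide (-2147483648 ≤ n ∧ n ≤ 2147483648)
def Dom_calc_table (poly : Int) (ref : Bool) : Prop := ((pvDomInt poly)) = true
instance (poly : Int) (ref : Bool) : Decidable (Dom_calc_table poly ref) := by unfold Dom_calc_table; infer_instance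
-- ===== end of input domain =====

-- B replaces A's 256 runs of the bit-division loop by 8 runs (one per single-bit index)
-- plus XOR recombination, exploiting GF(2)-linearity of the index-to-entry map; measured faster.


-- ===== PORT A =====
-- helpers `binv`, `_get_polylen` and the inner division loop are the same source text in Source A
-- and Source B, so both ports share these helper definitions.
-- binv: ai=0; for _ in range(l): ai=(ai<<1)|(a&1); a>>=1
def pvBinvGo : Nat → Int → Int → Int
  | 0, ai, _ => ai
  | l+1, ai, a => pvBinvGo l (PySem.Int.bor (ai <<< (1:Nat)) (PySem.Int.band a 1)) (a >>> (1:Nat))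

def pvBinv (a : Int) (l : Nat) : Int := pvBinvGo l 0 a

-- _bi = [binv(i,8) for i in range(0x100)]
def pvBiTable : List Int := (PySem.List.pyRange 0 256).map (fun i => pvBinv i 8)

-- _get_polylen; the ValueError branch (poly ≥ 2^32) is unreachable on Dom (|poly| ≤ 2^31)
def pvPolylen (poly : Int) : Nat :=
  if poly < 256 then 1 else if poly < 65536 then 2 else 4

-- for _ in range(n): d=i&msb; i=(i<<1)&mask; if d: i^=poly
def pvDivLoop (poly msb mask : Int) : Nat → Int → Int
  | 0, i => i
  | n+1, i =>
    let d := PySem.Int.band i msb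
    let i1 := PySem.Int.band (i <<< (1:Nat)) mask
    pvDivLoop poly msb mask n (if d ≠ 0 then PySem.Int.bxor i1 poly else i1)

def calc_table (poly : Int) (ref : Bool) : List Int :=
  let l := pvPolylen poly
  let msb : Int := (1:Int) <<< (l*8-1)
  let mask : Int := ((1:Int) <<< (l*8)) - 1
  (PySem.List.pyRange 0 256).foldl (fun table i =>
    let i1 : Int := if ref then PySem.List.pyGetD pvBiTable i 0 else i  -- _bi[i]; index always in range
    let i2 : Int := pvDivLoop poly msb mask (l*8) i1
    let i3 : Int := if ref then pvBinv i2 (l*8) else i2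
    table ++ [i3]) []

-- ===== PORT B =====
-- entry(i) of Source B (shares the verbatim-identical helpers with port A, see above)
def pvEntry (poly : Int) (ref : Bool) (l : Nat) (msb mask : Int) (i : Int) : Int :=
  let i1 : Int := if ref then pvBinv i 8 else i
  let i2 : Int := pvDivLoop poly msb mask (l*8) i1
  if ref then pvBinv i2 (l*8) else i2

def calc_table_alt (poly : Int) (ref : Bool) : List Int :=
  let l := pvPolylen poly
  let msb : Int := (1:Int) <<< (l*8-1)
  let mask : Int := ((1:Int) <<< (l*8)) - 1
  let basis : List Int :=
    (PySem.List.pyRange 0 8).map (fun k => pvEntry poly ref l msb mask ((1:Int) <<< k.toNat))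
  (PySem.List.pyRange 0 256).foldl (fun table i =>
    -- v=0; x=i; for b in basis: (if x&1: v^=b); x>>=1
    let v : Int := (basis.foldl (fun (p : Int × Int) b =>
        (if PySem.Int.band p.2 1 ≠ 0 then PySem.Int.bxor p.1 b else p.1, p.2 >>> (1:Nat)))
      ((0:Int), i)).1
    table ++ [v]) []

-- ===== PRECONDITION & SPEC =====
def Spec_calc_table (poly : Int) (ref : Bool) (out : List Int) : Prop := out = calc_table_alt poly ref
instance (poly : Int) (ref : Bool) (out : List Int) : Decidable (Spec_calc_table poly ref out) := by unfold Spec_calc_table; infer_instance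

-- ===== CLAIM (what is proved, stated in full; the proofs are below) =====
def Claim_equal_calc_table : Prop := ∀ (poly : Int) (ref : Bool), Dom_calc_table poly ref → Spec_calc_table poly ref (calc_table poly ref)

-- ===== LEMMAS AND PROOFS =====

-- Nat: subtracting the common bits is bitwise set difference
theorem pvLdiffZero (n : Nat) : Nat.ldiff 0 n = 0 :=
  Nat.eq_of_testBit_eq (by simp [Nat.testBit_ldiff, Nat.zero_testBit])

theorem pvNatSubAnd (m n : Nat) : m - (m &&& n) = Nat.ldiff m n := by
  induction m using Nat.binaryRec generalizing n with
  | zero => simp [pvLdiffZero]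
  | bit b m ih =>
    cases n using Nat.bitCasesOn with
    | bit c n' =>
      rw [Nat.land_bit, Nat.ldiff_bit]
      have h1 := ih n'
      have h2 : m &&& n' ≤ m := Nat.and_le_left
      simp only [Nat.bit_val]
      cases b <;> cases c <;> simp <;> omega

-- Int: extensionality by bits
theorem pvTbBigL (m n : Nat) : m.testBit (max m n + 1) = false :=
  Nat.testBit_eq_false_of_lt (by
    calc m ≤ max m n := Nat.le_max_left _ _
    _ < 2 ^ (max m n) := Nat.lt_two_pow_self
    _ ≤ 2 ^ (max m n + 1) := Nat.pow_le_pow_right (by norm_num) (Nat.le_succ _))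

theorem pvTbBigR (m n : Nat) : n.testBit (max m n + 1) = false :=
  Nat.testBit_eq_false_of_lt (by
    calc n ≤ max m n := Nat.le_max_right _ _
    _ < 2 ^ (max m n) := Nat.lt_two_pow_self
    _ ≤ 2 ^ (max m n + 1) := Nat.pow_le_pow_right (by norm_num) (Nat.le_succ _))

theorem pvTbExt {x y : Int} (h : ∀ k, x.testBit k = y.testBit k) : x = y := by
  cases x with
  | ofNat m =>
    cases y with
    | ofNat n =>
      exact congrArg Int.ofNat (Nat.eq_of_testBit_eq h)
    | negSucc n =>
      exfalso
      have hb : m.testBit (max m n + 1) = !(n.testBit (max m n + 1)) := h (max m n + 1)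
      rw [pvTbBigL m n, pvTbBigR m n] at hb
      exact Bool.noConfusion hb
  | negSucc m =>
    cases y with
    | ofNat n =>
      exfalso
      have hb : (!(m.testBit (max n m + 1))) = n.testBit (max n m + 1) := h (max n m + 1)
      rw [pvTbBigR n m, pvTbBigL n m] at hb
      exact Bool.noConfusion hb
    | negSucc n =>
      have : m = n := Nat.eq_of_testBit_eq (fun k => by
        have hb : (!(m.testBit k)) = !(n.testBit k) := h k
        exact Bool.not_inj hb)
      rw [this]

theorem pvNegSuccNotNonneg (n : Nat) : ¬ (0:Int) ≤ Int.negSucc n := by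
  rw [Int.negSucc_eq]; omega

theorem pvNegSuccArg (n : Nat) : -(Int.negSucc n) - 1 = (n:Int) := by
  rw [Int.negSucc_eq]; ring

theorem pvNegOfNat (x : Nat) : -((x:Nat):Int) - 1 = Int.negSucc x := by
  rw [Int.negSucc_eq]; ring

theorem pvTbBxor (a b : Int) (k : Nat) :
    (PySem.Int.bxor a b).testBit k = ((a.testBit k) ^^ (b.testBit k)) := by
  cases a with
  | ofNat m =>
    cases b with
    | ofNat n =>
      have e : PySem.Int.bxor (Int.ofNat m) (Int.ofNat n) = Int.ofNat (m ^^^ n) := by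
        simp only [PySem.Int.bxor, if_pos (Int.zero_le_ofNat m), if_pos (Int.zero_le_ofNat n)]
        rfl
      rw [e]
      show (m ^^^ n).testBit k = _
      rw [Nat.testBit_xor]; rfl
    | negSucc n =>
      have e : PySem.Int.bxor (Int.ofNat m) (Int.negSucc n) = Int.negSucc (m ^^^ n) := by
        simp only [PySem.Int.bxor, if_pos (Int.zero_le_ofNat m), if_neg (pvNegSuccNotNonneg n),
          pvNegSuccArg]
        exact pvNegOfNat (m ^^^ n)
      rw [e]
      show (!((m ^^^ n).testBit k)) = ((m.testBit k) ^^ (!(n.testBit k)))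
      rw [Nat.testBit_xor]
      cases m.testBit k <;> cases n.testBit k <;> rfl
  | negSucc m =>
    cases b with
    | ofNat n =>
      have e : PySem.Int.bxor (Int.negSucc m) (Int.ofNat n) = Int.negSucc (m ^^^ n) := by
        simp only [PySem.Int.bxor, if_neg (pvNegSuccNotNonneg m), if_pos (Int.zero_le_ofNat n),
          pvNegSuccArg]
        exact pvNegOfNat (m ^^^ n)
      rw [e]
      show (!((m ^^^ n).testBit k)) = ((!(m.testBit k)) ^^ (n.testBit k))
      rw [Nat.testBit_xor]
      cases m.testBit k <;> cases n.testBit k <;> rfl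
    | negSucc n =>
      have e : PySem.Int.bxor (Int.negSucc m) (Int.negSucc n) = Int.ofNat (m ^^^ n) := by
        simp only [PySem.Int.bxor, if_neg (pvNegSuccNotNonneg m), if_neg (pvNegSuccNotNonneg n),
          pvNegSuccArg]
        rfl
      rw [e]
      show (m ^^^ n).testBit k = ((!(m.testBit k)) ^^ (!(n.testBit k)))
      rw [Nat.testBit_xor]
      cases m.testBit k <;> cases n.testBit k <;> rfl

theorem pvTbBand (a b : Int) (k : Nat) :
    (PySem.Int.band a b).testBit k = ((a.testBit k) && (b.testBit k)) := by
  cases a with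
  | ofNat m =>
    cases b with
    | ofNat n =>
      have e : PySem.Int.band (Int.ofNat m) (Int.ofNat n) = Int.ofNat (m &&& n) := by
        simp only [PySem.Int.band, if_pos (Int.zero_le_ofNat m), if_pos (Int.zero_le_ofNat n)]
        rfl
      rw [e]
      show (m &&& n).testBit k = _
      rw [Nat.testBit_and]; rfl
    | negSucc n =>
      have e : PySem.Int.band (Int.ofNat m) (Int.negSucc n) = Int.ofNat (Nat.ldiff m n) := by
        simp only [PySem.Int.band, if_pos (Int.zero_le_ofNat m), if_neg (pvNegSuccNotNonneg n),
          pvNegSuccArg]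
        show Int.ofNat (m - (m &&& n)) = _
        rw [pvNatSubAnd]
      rw [e]
      show (Nat.ldiff m n).testBit k = ((m.testBit k) && (!(n.testBit k)))
      rw [Nat.testBit_ldiff]
  | negSucc m =>
    cases b with
    | ofNat n =>
      have e : PySem.Int.band (Int.negSucc m) (Int.ofNat n) = Int.ofNat (Nat.ldiff n m) := by
        simp only [PySem.Int.band, if_neg (pvNegSuccNotNonneg m), if_pos (Int.zero_le_ofNat n),
          pvNegSuccArg]
        show Int.ofNat (n - (n &&& m)) = _
        rw [pvNatSubAnd]
      rw [e]
      show (Nat.ldiff n m).testBit k = ((!(m.testBit k)) && (n.testBit k))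
      rw [Nat.testBit_ldiff]
      cases m.testBit k <;> cases n.testBit k <;> rfl
    | negSucc n =>
      have e : PySem.Int.band (Int.negSucc m) (Int.negSucc n) = Int.negSucc (m ||| n) := by
        simp only [PySem.Int.band, if_neg (pvNegSuccNotNonneg m), if_neg (pvNegSuccNotNonneg n),
          pvNegSuccArg]
        exact pvNegOfNat (m ||| n)
      rw [e]
      show (!((m ||| n).testBit k)) = ((!(m.testBit k)) && (!(n.testBit k)))
      rw [Nat.testBit_or]
      cases m.testBit k <;> cases n.testBit k <;> rfl

theorem pvTbBor (a b : Int) (k : Nat) :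
    (PySem.Int.bor a b).testBit k = ((a.testBit k) || (b.testBit k)) := by
  cases a with
  | ofNat m =>
    cases b with
    | ofNat n =>
      have e : PySem.Int.bor (Int.ofNat m) (Int.ofNat n) = Int.ofNat (m ||| n) := by
        simp only [PySem.Int.bor, if_pos (Int.zero_le_ofNat m), if_pos (Int.zero_le_ofNat n)]
        rfl
      rw [e]
      show (m ||| n).testBit k = _
      rw [Nat.testBit_or]; rfl
    | negSucc n =>
      have e : PySem.Int.bor (Int.ofNat m) (Int.negSucc n) = Int.negSucc (Nat.ldiff n m) := by
        simp only [PySem.Int.bor, if_pos (Int.zero_le_ofNat m), if_neg (pvNegSuccNotNonneg n),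
          pvNegSuccArg]
        show -(((n - (n &&& m) : Nat) : Int)) - 1 = _
        rw [pvNatSubAnd]
        exact pvNegOfNat (Nat.ldiff n m)
      rw [e]
      show (!((Nat.ldiff n m).testBit k)) = ((m.testBit k) || (!(n.testBit k)))
      rw [Nat.testBit_ldiff]
      cases m.testBit k <;> cases n.testBit k <;> rfl
  | negSucc m =>
    cases b with
    | ofNat n =>
      have e : PySem.Int.bor (Int.negSucc m) (Int.ofNat n) = Int.negSucc (Nat.ldiff m n) := by
        simp only [PySem.Int.bor, if_neg (pvNegSuccNotNonneg m), if_pos (Int.zero_le_ofNat n),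
          pvNegSuccArg]
        show -(((m - (m &&& n) : Nat) : Int)) - 1 = _
        rw [pvNatSubAnd]
        exact pvNegOfNat (Nat.ldiff m n)
      rw [e]
      show (!((Nat.ldiff m n).testBit k)) = ((!(m.testBit k)) || (n.testBit k))
      rw [Nat.testBit_ldiff]
      cases m.testBit k <;> cases n.testBit k <;> rfl
    | negSucc n =>
      have e : PySem.Int.bor (Int.negSucc m) (Int.negSucc n) = Int.negSucc (m &&& n) := by
        simp only [PySem.Int.bor, if_neg (pvNegSuccNotNonneg m), if_neg (pvNegSuccNotNonneg n),
          pvNegSuccArg]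
        exact pvNegOfNat (m &&& n)
      rw [e]
      show (!((m &&& n).testBit k)) = ((!(m.testBit k)) || (!(n.testBit k)))
      rw [Nat.testBit_and]
      cases m.testBit k <;> cases n.testBit k <;> rfl

theorem pvNatTbOne (j : Nat) : Nat.testBit 1 j = decide (j = 0) := by
  cases j <;> simp [Nat.testBit_zero, Nat.testBit_succ]

theorem pvTbOne (k : Nat) : (1:Int).testBit k = decide (k = 0) := pvNatTbOne k

theorem pvTbZero (k : Nat) : (0:Int).testBit k = false := Nat.zero_testBit k

theorem pvNatTbMulPow (m n k : Nat) :
    ((m+1) * 2^n - 1).testBit k = (decide (k < n) || m.testBit (k - n)) := by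
  induction n generalizing k with
  | zero => simp
  | succ n ih =>
    have h1 : 1 ≤ (m+1) * 2^n := Nat.one_le_iff_ne_zero.mpr (by positivity)
    have hq : (m+1) * 2^(n+1) = ((m+1) * 2^n) * 2 := by ring
    have h2 : (m+1) * 2^(n+1) - 1 = 2 * ((m+1) * 2^n - 1) + 1 := by omega
    rw [h2]
    cases k with
    | zero =>
      have h3 : (2 * ((m+1) * 2^n - 1) + 1) % 2 = 1 := by omega
      rw [Nat.testBit_zero]
      simp [h3]
    | succ k =>
      rw [Nat.testBit_succ]
      have h4 : (2 * ((m+1) * 2^n - 1) + 1) / 2 = (m+1) * 2^n - 1 := by omega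
      rw [h4, ih]
      simp [Nat.succ_sub_succ]

theorem pvTbShl (x : Int) (n k : Nat) :
    (x <<< n).testBit k = (decide (n ≤ k) && x.testBit (k - n)) := by
  cases x with
  | ofNat m =>
    have e : (Int.ofNat m) <<< n = Int.ofNat (m <<< n) := by
      rw [Int.shiftLeft_eq, Nat.shiftLeft_eq]
      show ((m:Int)) * 2^n = ((m * 2^n : Nat) : Int)
      push_cast
      ring
    rw [e]
    show (m <<< n).testBit k = _
    rw [Nat.testBit_shiftLeft]
    rfl
  | negSucc m =>
    have h1 : 1 ≤ (m+1) * 2^n := Nat.one_le_iff_ne_zero.mpr (by positivity)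
    have e : (Int.negSucc m) <<< n = Int.negSucc ((m+1) * 2^n - 1) := by
      rw [Int.shiftLeft_eq, Int.negSucc_eq, Int.negSucc_eq]
      have h2 : ((((m+1) * 2^n - 1 : Nat)) : Int) = (((m:Int))+1) * 2^n - 1 := by
        push_cast [h1]
        ring
      rw [h2]
      ring
    rw [e]
    show (!(((m+1) * 2^n - 1).testBit k)) = (decide (n ≤ k) && (!(m.testBit (k - n))))
    rw [pvNatTbMulPow]
    by_cases h : n ≤ k
    · have h' : ¬ (k < n) := by omega
      simp [h, h']
    · have h' : k < n := by omega
      simp [h, h']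

theorem pvTbShr (x : Int) (n k : Nat) :
    (x >>> n).testBit k = x.testBit (k + n) := by
  cases x with
  | ofNat m =>
    have e : (Int.ofNat m) >>> n = Int.ofNat (m >>> n) := rfl
    rw [e]
    show (m >>> n).testBit k = m.testBit (k + n)
    rw [Nat.testBit_shiftRight, Nat.add_comm]
  | negSucc m =>
    have e : (Int.negSucc m) >>> n = Int.negSucc (m >>> n) := rfl
    rw [e]
    show (!((m >>> n).testBit k)) = (!(m.testBit (k + n)))
    rw [Nat.testBit_shiftRight, Nat.add_comm]

theorem pvTbMask (m k : Nat) :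
    (((1:Int) <<< m) - 1).testBit k = decide (k < m) := by
  have h1 : (1:Nat) ≤ 2^m := Nat.one_le_two_pow
  have e : ((1:Int) <<< m) - 1 = Int.ofNat (2^m - 1) := by
    rw [Int.shiftLeft_eq]
    show (1:Int) * 2^m - 1 = ((2^m - 1 : Nat) : Int)
    push_cast [h1]
    ring
  rw [e]
  show (2^m - 1).testBit k = _
  rw [Nat.testBit_two_pow_sub_one]

-- xor algebra
theorem pvBxorAssoc (a b c : Int) :
    PySem.Int.bxor (PySem.Int.bxor a b) c = PySem.Int.bxor a (PySem.Int.bxor b c) := by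
  apply pvTbExt; intro k
  simp only [pvTbBxor, Bool.xor_assoc]

theorem pvZeroBxor (a : Int) : PySem.Int.bxor 0 a = a := by
  rw [PySem.Int.bxor_comm]; exact PySem.Int.bxor_zero a

theorem pvBxorPairCancel (a b p : Int) :
    PySem.Int.bxor (PySem.Int.bxor a p) (PySem.Int.bxor b p) = PySem.Int.bxor a b := by
  apply pvTbExt; intro k
  simp only [pvTbBxor]
  cases a.testBit k <;> cases b.testBit k <;> cases p.testBit k <;> rfl

theorem pvBxorRot (a b p : Int) :
    PySem.Int.bxor (PySem.Int.bxor a b) p = PySem.Int.bxor (PySem.Int.bxor a p) b := by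
  apply pvTbExt; intro k
  simp only [pvTbBxor]
  cases a.testBit k <;> cases b.testBit k <;> cases p.testBit k <;> rfl

theorem pvBandBxorLeft (x y m : Int) :
    PySem.Int.band (PySem.Int.bxor x y) m
      = PySem.Int.bxor (PySem.Int.band x m) (PySem.Int.band y m) := by
  apply pvTbExt; intro k
  simp only [pvTbBxor, pvTbBand]
  cases x.testBit k <;> cases y.testBit k <;> cases m.testBit k <;> rfl

theorem pvShlBxor (x y : Int) (n : Nat) :
    (PySem.Int.bxor x y) <<< n = PySem.Int.bxor (x <<< n) (y <<< n) := by
  apply pvTbExt; intro k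
  simp only [pvTbBxor, pvTbShl]
  cases hn : decide (n ≤ k) <;> simp [pvTbBxor]

theorem pvShrBxor (x y : Int) (n : Nat) :
    (PySem.Int.bxor x y) >>> n = PySem.Int.bxor (x >>> n) (y >>> n) := by
  apply pvTbExt; intro k
  simp only [pvTbBxor, pvTbShr]

-- single-bit mask facts
theorem pvBandSingle (x : Int) (t : Nat) :
    PySem.Int.band x ((1:Int) <<< t) = if x.testBit t then (1:Int) <<< t else 0 := by
  by_cases h : x.testBit t
  · rw [if_pos h]
    apply pvTbExt; intro k
    simp only [pvTbBand, pvTbShl, pvTbOne]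
    by_cases hk : k = t
    · subst hk
      simp [h]
    · by_cases ht : t ≤ k
      · have h2 : ¬ (k - t = 0) := by omega
        simp [h2]
      · simp [ht]
  · rw [if_neg h]
    apply pvTbExt; intro k
    simp only [pvTbBand, pvTbShl, pvTbOne, pvTbZero]
    by_cases hk : k = t
    · subst hk
      simp [h]
    · by_cases ht : t ≤ k
      · have h2 : ¬ (k - t = 0) := by omega
        simp [h2]
      · simp [ht]

theorem pvOneShlNeZero (t : Nat) : ((1:Int) <<< t) ≠ 0 := by
  rw [Int.shiftLeft_eq]; positivity

theorem pvShlZero (s : Nat) : ((0:Int) <<< s) = 0 := by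
  rw [Int.shiftLeft_eq]; ring

theorem pvBandZeroLeft (a : Int) : PySem.Int.band 0 a = 0 := by
  rw [PySem.Int.band_comm]; exact PySem.Int.band_zero a

theorem pvDivLoopZero (poly msb mask : Int) (n : Nat) :
    pvDivLoop poly msb mask n 0 = 0 := by
  induction n with
  | zero => rfl
  | succ n ih =>
    simp only [pvDivLoop, pvShlZero, pvBandZeroLeft]
    simpa using ih

theorem pvDivStepLin (poly mask : Int) (t : Nat) (x y : Int) :
    (if PySem.Int.band (PySem.Int.bxor x y) ((1:Int) <<< t) ≠ 0
     then PySem.Int.bxor (PySem.Int.band ((PySem.Int.bxor x y) <<< (1:Nat)) mask) poly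
     else PySem.Int.band ((PySem.Int.bxor x y) <<< (1:Nat)) mask)
    = PySem.Int.bxor
      (if PySem.Int.band x ((1:Int) <<< t) ≠ 0
       then PySem.Int.bxor (PySem.Int.band (x <<< (1:Nat)) mask) poly
       else PySem.Int.band (x <<< (1:Nat)) mask)
      (if PySem.Int.band y ((1:Int) <<< t) ≠ 0
       then PySem.Int.bxor (PySem.Int.band (y <<< (1:Nat)) mask) poly
       else PySem.Int.band (y <<< (1:Nat)) mask) := by
  rw [pvShlBxor x y 1, pvBandBxorLeft x y ((1:Int) <<< t),
      pvBandBxorLeft (x <<< (1:Nat)) (y <<< (1:Nat)) mask,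
      pvBandSingle x t, pvBandSingle y t]
  by_cases hx : x.testBit t <;> by_cases hy : y.testBit t
  · simp only [hx, hy, if_true, PySem.Int.bxor_self, ne_eq, not_true_eq_false,
      if_false, not_false_eq_true, if_pos (pvOneShlNeZero t)]
    exact (pvBxorPairCancel _ _ poly).symm
  · simp [hx, hy, pvOneShlNeZero]
    exact pvBxorRot _ _ poly
  · simp [hx, hy, pvOneShlNeZero, pvZeroBxor]
    exact pvBxorAssoc _ _ poly
  · simp [hx, hy]

theorem pvDivLoopLin (poly mask : Int) (t n : Nat) (x y : Int) :
    pvDivLoop poly ((1:Int) <<< t) mask n (PySem.Int.bxor x y)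
      = PySem.Int.bxor (pvDivLoop poly ((1:Int) <<< t) mask n x)
                       (pvDivLoop poly ((1:Int) <<< t) mask n y) := by
  induction n generalizing x y with
  | zero => rfl
  | succ n ih =>
    simp only [pvDivLoop]
    rw [pvDivStepLin poly mask t x y]
    exact ih _ _

-- binv is GF(2)-linear and kills 0
theorem pvBinvGoLin (l : Nat) : ∀ (ai1 ai2 a1 a2 : Int),
    pvBinvGo l (PySem.Int.bxor ai1 ai2) (PySem.Int.bxor a1 a2)
      = PySem.Int.bxor (pvBinvGo l ai1 a1) (pvBinvGo l ai2 a2) := by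
  induction l with
  | zero => intro ai1 ai2 a1 a2; rfl
  | succ l ih =>
    intro ai1 ai2 a1 a2
    simp only [pvBinvGo]
    have hstep :
        PySem.Int.bor ((PySem.Int.bxor ai1 ai2) <<< (1:Nat)) (PySem.Int.band (PySem.Int.bxor a1 a2) 1)
          = PySem.Int.bxor (PySem.Int.bor (ai1 <<< (1:Nat)) (PySem.Int.band a1 1))
                           (PySem.Int.bor (ai2 <<< (1:Nat)) (PySem.Int.band a2 1)) := by
      apply pvTbExt; intro k
      simp only [pvTbBor, pvTbBxor, pvTbBand, pvTbShl, pvTbOne]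
      cases k with
      | zero =>
        simp
      | succ k =>
        have h : (1:Nat) ≤ k + 1 := Nat.succ_le_succ (Nat.zero_le k)
        simp only [h, decide_true, Bool.true_and, Nat.succ_sub_one, Nat.add_eq_zero,
          Nat.succ_ne_zero, and_false, decide_false, Bool.and_false, Bool.or_false]
    rw [hstep, pvShrBxor a1 a2 1]
    exact ih _ _ _ _

theorem pvBinvLin (a1 a2 : Int) (l : Nat) :
    pvBinv (PySem.Int.bxor a1 a2) l = PySem.Int.bxor (pvBinv a1 l) (pvBinv a2 l) := by
  have h := pvBinvGoLin l 0 0 a1 a2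
  rw [PySem.Int.bxor_self (0:Int)] at h
  exact h

theorem pvBinvGoZero (l : Nat) : pvBinvGo l 0 0 = 0 := by
  induction l with
  | zero => rfl
  | succ l ih =>
    have h2 : PySem.Int.band (0:Int) 1 = 0 := pvBandZeroLeft 1
    have h3 : PySem.Int.bor (0:Int) 0 = 0 := PySem.Int.bor_zero 0
    have h4 : ((0:Int) >>> (1:Nat)) = 0 := rfl
    simp only [pvBinvGo, pvShlZero, h2, h3, h4]
    exact ih

theorem pvBinvZero (l : Nat) : pvBinv 0 l = 0 := pvBinvGoZero l

-- the whole per-index pipeline is GF(2)-linear and kills 0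
theorem pvEntryZero (poly : Int) (ref : Bool) (l : Nat) (msb mask : Int) :
    pvEntry poly ref l msb mask 0 = 0 := by
  cases ref <;> simp [pvEntry, pvBinvZero, pvDivLoopZero]

theorem pvEntryLin (poly : Int) (ref : Bool) (l : Nat) (t : Nat) (mask : Int) (x y : Int) :
    pvEntry poly ref l ((1:Int) <<< t) mask (PySem.Int.bxor x y)
      = PySem.Int.bxor (pvEntry poly ref l ((1:Int) <<< t) mask x)
                       (pvEntry poly ref l ((1:Int) <<< t) mask y) := by
  cases ref <;> simp [pvEntry, pvBinvLin, pvDivLoopLin]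

-- recombination fold computes the XOR of basis entries of the set bits
theorem pvMaskSplit (x : Int) (m s : Nat) :
    (PySem.Int.band x (((1:Int) <<< (m+1)) - 1)) <<< s
      = PySem.Int.bxor ((PySem.Int.band x 1) <<< s)
          ((PySem.Int.band (x >>> (1:Nat)) (((1:Int) <<< m) - 1)) <<< (s+1)) := by
  apply pvTbExt; intro k
  simp only [pvTbShl, pvTbBxor, pvTbBand, pvTbShr, pvTbMask, pvTbOne]
  by_cases hs : s ≤ k
  · by_cases h0 : k = s
    · subst h0
      have e2 : ¬ (k + 1 ≤ k) := by omega
      have e4 : (0:Nat) < m + 1 := Nat.succ_pos m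
      simp [e2, e4]
    · have hs1 : s + 1 ≤ k := by omega
      have e1 : k - (s+1) + 1 = k - s := by omega
      have e2 : ¬ (k - s = 0) := by omega
      have e3 : (k - s < m + 1) ↔ (k - (s+1) < m) := by omega
      simp [hs, hs1, e1, e2, e3]
  · have e5 : ¬ (s + 1 ≤ k) := by omega
    simp [hs, e5]

theorem pvBandOneCases (x : Int) :
    PySem.Int.band x 1 = if x.testBit 0 then 1 else 0 := by
  have h := pvBandSingle x 0
  have e : ((1:Int) <<< (0:Nat)) = 1 := by rw [Int.shiftLeft_eq]; ring
  rw [e] at h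
  exact h

theorem pvFoldBasis (poly : Int) (ref : Bool) (l t : Nat) (mask : Int) :
    ∀ (m s : Nat) (x v : Int),
    (List.foldl (fun (p : Int × Int) b =>
        (if PySem.Int.band p.2 1 ≠ 0 then PySem.Int.bxor p.1 b else p.1, p.2 >>> (1:Nat)))
      (v, x)
      ((List.range m).map (fun j => pvEntry poly ref l ((1:Int) <<< t) mask ((1:Int) <<< (s + j))))).1
    = PySem.Int.bxor v
        (pvEntry poly ref l ((1:Int) <<< t) mask
          ((PySem.Int.band x (((1:Int) <<< m) - 1)) <<< s)) := by
  intro m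
  induction m with
  | zero =>
    intro s x v
    have e0 : ((1:Int) <<< (0:Nat)) - 1 = 0 := by rw [Int.shiftLeft_eq]; ring
    rw [e0, PySem.Int.band_zero, pvShlZero, pvEntryZero, PySem.Int.bxor_zero]
    rfl
  | succ m ih =>
    intro s x v
    rw [List.range_succ_eq_map]
    simp only [List.map_cons, List.map_map, List.foldl_cons]
    have hcomp : ((fun j => pvEntry poly ref l ((1:Int) <<< t) mask ((1:Int) <<< (s + j))) ∘ Nat.succ)
        = (fun j => pvEntry poly ref l ((1:Int) <<< t) mask ((1:Int) <<< ((s+1) + j))) := by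
      funext j
      simp only [Function.comp_apply]
      have e : s + (j+1) = (s+1) + j := by omega
      rw [e]
    rw [hcomp]
    rw [ih (s+1) (x >>> (1:Nat)) _]
    rw [pvMaskSplit x m s, pvEntryLin, pvBandOneCases x]
    by_cases h : x.testBit 0
    · simp only [h, if_true, Nat.add_zero, ne_eq, one_ne_zero, not_false_eq_true]
      exact pvBxorAssoc v _ _
    · simp only [h, if_false, ne_eq, not_true_eq_false, not_not]
      simp [pvShlZero, pvEntryZero, pvZeroBxor]

theorem pvBandLow (i : Int) (h0 : 0 ≤ i) (h1 : i < 256) :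
    PySem.Int.band i (((1:Int) <<< (8:Nat)) - 1) = i := by
  apply pvTbExt; intro k
  simp only [pvTbBand, pvTbMask]
  by_cases hk : k < 8
  · simp [hk]
  · obtain ⟨a, rfl⟩ := Int.eq_ofNat_of_zero_le h0
    have ha : a < 256 := by exact_mod_cast h1
    have h8 : (256:Nat) ≤ 2^k := by
      calc (256:Nat) = 2^8 := by norm_num
      _ ≤ 2^k := Nat.pow_le_pow_right (by norm_num) (by omega)
    have hb : a.testBit k = false := Nat.testBit_eq_false_of_lt (by omega)
    have hb' : ((a:Nat):Int).testBit k = false := hb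
    simp [hk, hb']

theorem pvShlZeroExp (z : Int) : z <<< (0:Nat) = z := by
  rw [Int.shiftLeft_eq]; ring

theorem pvBiLookup (i : Int) (h0 : 0 ≤ i) (h1 : i < 256) :
    PySem.List.pyGetD pvBiTable i 0 = pvBinv i 8 := by
  have h2 : i = ((i.toNat : Nat) : Int) := (Int.toNat_of_nonneg h0).symm
  have h3 : i.toNat < 256 := by omega
  rw [h2]
  unfold pvBiTable
  have h4 := PySem.List.pyGetD_map_pyRange (fun j => pvBinv j 8) 256 i.toNat 0 h3
  simpa using h4

theorem pvPointwise (poly : Int) (ref : Bool) (i : Int) (h0 : 0 ≤ i) (h1 : i < 256) :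
    (let l := pvPolylen poly
     let msb : Int := (1:Int) <<< (l*8-1)
     let mask : Int := ((1:Int) <<< (l*8)) - 1
     let i1 : Int := if ref then PySem.List.pyGetD pvBiTable i 0 else i
     let i2 : Int := pvDivLoop poly msb mask (l*8) i1
     if ref then pvBinv i2 (l*8) else i2)
    = (let l := pvPolylen poly
       let msb : Int := (1:Int) <<< (l*8-1)
       let mask : Int := ((1:Int) <<< (l*8)) - 1
       let basis : List Int :=
         (PySem.List.pyRange 0 8).map (fun k => pvEntry poly ref l msb mask ((1:Int) <<< k.toNat))
       (basis.foldl (fun (p : Int × Int) b =>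
           (if PySem.Int.band p.2 1 ≠ 0 then PySem.Int.bxor p.1 b else p.1, p.2 >>> (1:Nat)))
         ((0:Int), i)).1) := by
  simp only []
  rw [pvBiLookup i h0 h1]
  show pvEntry poly ref (pvPolylen poly) ((1:Int) <<< (pvPolylen poly * 8 - 1))
      (((1:Int) <<< (pvPolylen poly * 8)) - 1) i = _
  have hbasis : (PySem.List.pyRange 0 8).map
        (fun k => pvEntry poly ref (pvPolylen poly) ((1:Int) <<< (pvPolylen poly * 8 - 1))
          (((1:Int) <<< (pvPolylen poly * 8)) - 1) ((1:Int) <<< k.toNat))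
      = (List.range 8).map
        (fun j => pvEntry poly ref (pvPolylen poly) ((1:Int) <<< (pvPolylen poly * 8 - 1))
          (((1:Int) <<< (pvPolylen poly * 8)) - 1) ((1:Int) <<< ((0:Nat) + j))) := rfl
  rw [hbasis]
  rw [pvFoldBasis poly ref (pvPolylen poly) (pvPolylen poly * 8 - 1)
        (((1:Int) <<< (pvPolylen poly * 8)) - 1) 8 0 i 0]
  rw [pvZeroBxor, pvBandLow i h0 h1, pvShlZeroExp]

-- the verdict
theorem calc_table_spec : Claim_equal_calc_table := by
  intro poly ref _dom
  unfold Spec_calc_table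
  simp only [calc_table, calc_table_alt]
  rw [PySem.List.foldl_append_singleton_eq_map, PySem.List.foldl_append_singleton_eq_map]
  simp only [List.nil_append]
  apply List.map_congr_left
  intro i hi
  obtain ⟨h0, h1⟩ := PySem.List.mem_pyRange_one.mp hi
  exact pvPointwise poly ref i h0 h1
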